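-- pv_equiv track=rewrite | github.com/luuismrtn/Advent-Of-Code-42-2024 | day3/day3+.py | pick_next_function
-- ===== SOURCE A (Python) =====
-- def pick_next_function(text, i):
--     end = text.find(")", i)
--     if end == -1:
--         return ""
--
--     start = end
--     while start > i and text[start] not in ["m", "d"]:
--         start -= 1
--
--     if text[start] in ["m", "d"]:
--         return text[start:end+1]
--
--     return ""
-- ===== SOURCE B (Python) =====
-- def pick_next_function(text, i):
--     last_md = -1
--     for j in range(i, len(text)):
--         c = text[j]
--         if c in "md":
--             last_md = j
--         elif c == ")":
--             return "" if last_md == -1 else text[last_md:j+1]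
--     return ""
-- ===== Notes on version B (the rewrite author's own statement) =====
-- stated objective: alternative
-- what changed: A calls text.find(')', i) and then walks backwards from the ')' looking for the nearest 'm'/'d'; B is a single forward scan from i that remembers the rightmost 'm'/'d' seen and stops at the first ')'.
-- outside the precondition, e.g. on pick_next_function(')m)', -1): A returns 'm)', B returns ''
import Mathlib
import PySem

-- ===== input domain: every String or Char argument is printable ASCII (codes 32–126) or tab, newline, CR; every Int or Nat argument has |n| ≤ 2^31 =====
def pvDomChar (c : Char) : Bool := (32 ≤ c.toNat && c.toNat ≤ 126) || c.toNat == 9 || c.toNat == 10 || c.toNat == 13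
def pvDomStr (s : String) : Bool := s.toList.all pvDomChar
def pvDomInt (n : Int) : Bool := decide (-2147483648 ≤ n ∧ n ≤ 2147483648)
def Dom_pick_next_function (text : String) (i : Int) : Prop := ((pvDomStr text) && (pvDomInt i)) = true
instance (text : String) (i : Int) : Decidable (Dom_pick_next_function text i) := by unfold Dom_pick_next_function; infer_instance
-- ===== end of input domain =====

-- B replaces A's find-then-backward-scan by a single forward scan that remembers the rightmost 'm'/'d'; alternative decomposition, same O(n) cost.


-- ===== PORT A =====
-- A: text.find(")", i), then a backward while-loop from that index looking for 'm'/'d':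
--   while start > i and text[start] not in ["m","d"]: start -= 1
-- The loop runs at most (start - i) times, which the fuel parameter makes structural
-- (fuel only makes the same computation total; it is spent exactly when start reaches i).
-- pyGet? = none is Python's IndexError, reachable only for i < 0, which Pre_ excludes.
def pickA_scan (cs : List Char) (i : Int) : Nat → Int → Int
  | 0, start => start
  | fuel + 1, start =>
    if i < start ∧ ¬ (PySem.List.pyGet? cs start = some 'm' ∨ PySem.List.pyGet? cs start = some 'd') then
      pickA_scan cs i fuel (start - 1)
    else start

def pick_next_function (text : String) (i : Int) : String :=
  let e := PySem.Str.findFrom text ")" i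
  if e = -1 then ""
  else
    let start := pickA_scan text.toList i (e - i).toNat e
    if PySem.List.pyGet? text.toList start = some 'm' ∨ PySem.List.pyGet? text.toList start = some 'd' then
      String.ofList (PySem.List.slice text.toList (some start) (some (e + 1)))
    else ""

-- ===== PORT B =====
-- B: for j in range(i, len(text)): remember the last 'm'/'d', stop at the first ')'.
-- The loop runs exactly (len(text) - i) times; that count is the structural fuel.
def pickB_loop (cs : List Char) : Nat → Int → Int → String
  | 0, _, _ => ""
  | fuel + 1, lastMd, j =>
    if j < (cs.length : Int) then
      match PySem.List.pyGet? cs j with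
      | none => ""   -- IndexError in Python (only j < -len, unreachable under Pre_)
      | some c =>
        if c = 'm' ∨ c = 'd' then pickB_loop cs fuel j (j + 1)
        else if c = ')' then
          if lastMd = -1 then "" else String.ofList (PySem.List.slice cs (some lastMd) (some (j + 1)))
        else pickB_loop cs fuel lastMd (j + 1)
    else ""

def pick_next_function_alt (text : String) (i : Int) : String :=
  pickB_loop text.toList ((text.toList.length : Int) - i).toNat (-1) i

-- ===== PRECONDITION & SPEC =====
-- Pre_ excludes negative i, on which A follows Python's negative-index semantics (find starts at
-- len+i and the backward scan wraps around below 0, raising IndexError for i < -len), while B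
-- simply scans forward from i; for all i ≥ 0 A returns normally and the programs agree.
def Pre_pick_next_function (text : String) (i : Int) : Prop := 0 ≤ i
instance (text : String) (i : Int) : Decidable (Pre_pick_next_function text i) := by unfold Pre_pick_next_function; infer_instance
def pvWitness_pick_next_function : String × Int := ("mul(2,3)", 0)

def Spec_pick_next_function (text : String) (i : Int) (out : String) : Prop := out = pick_next_function_alt text i
instance (text : String) (i : Int) (out : String) : Decidable (Spec_pick_next_function text i out) := by unfold Spec_pick_next_function; infer_instance

-- ===== CLAIM (what is proved, stated in full; the proofs are below) =====
def Claim_equal_pick_next_function : Prop := ∀ (text : String) (i : Int), Dom_pick_next_function text i → Pre_pick_next_function text i → Spec_pick_next_function text i (pick_next_function text i)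

-- ===== LEMMAS AND PROOFS =====

-- "text[k] is 'm' or 'd'":
def pvIsMd (cs : List Char) (k : Int) : Prop :=
  PySem.List.pyGet? cs k = some 'm' ∨ PySem.List.pyGet? cs k = some 'd'

-- rightmost 'm'/'d' index in [a, b), default d (the value B's last_md holds when the loop reaches b)
def pvLastMd (cs : List Char) : Nat → Int → Int → Int → Int
  | 0, d, _, _ => d
  | fuel + 1, d, a, b =>
    if a < b then
      pvLastMd cs fuel (if PySem.List.pyGet? cs a = some 'm' ∨ PySem.List.pyGet? cs a = some 'd' then a else d) (a + 1) b
    else d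

lemma pvLastMd_spec (cs : List Char) (b : Int) :
    ∀ (fuel : Nat) (a d : Int), (b - a).toNat = fuel → a ≤ b →
      (pvLastMd cs fuel d a b = d ∧ ∀ k, a ≤ k → k < b → ¬ pvIsMd cs k) ∨
      (a ≤ pvLastMd cs fuel d a b ∧ pvLastMd cs fuel d a b < b ∧ pvIsMd cs (pvLastMd cs fuel d a b) ∧
        ∀ k, pvLastMd cs fuel d a b < k → k < b → ¬ pvIsMd cs k) := by
  intro fuel
  induction fuel with
  | zero =>
    intro a d hn hab
    left
    exact ⟨rfl, fun k hk1 hk2 => absurd hk2 (by omega)⟩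
  | succ m ih =>
    intro a d hn hab
    have hlt : a < b := by omega
    rw [pvLastMd, if_pos hlt]
    by_cases hmd : PySem.List.pyGet? cs a = some 'm' ∨ PySem.List.pyGet? cs a = some 'd'
    · rw [if_pos hmd]
      rcases ih (a + 1) a (by omega) (by omega) with ⟨heq, hno⟩ | ⟨h1, h2, h3, h4⟩
      · right
        refine ⟨by omega, by omega, ?_, ?_⟩
        · rw [heq]; exact hmd
        · intro k hk1 hk2; rw [heq] at hk1; exact hno k (by omega) hk2
      · right; exact ⟨by omega, h2, h3, h4⟩
    · rw [if_neg hmd]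
      rcases ih (a + 1) d (by omega) (by omega) with ⟨heq, hno⟩ | ⟨h1, h2, h3, h4⟩
      · left
        refine ⟨heq, ?_⟩
        intro k hk1 hk2
        rcases eq_or_lt_of_le hk1 with hk | hk
        · subst hk; exact hmd
        · exact hno k (by omega) hk2
      · right; exact ⟨by omega, h2, h3, h4⟩

lemma pickA_scan_spec (cs : List Char) (i : Int) :
    ∀ (fuel : Nat) (e : Int), (e - i).toNat = fuel → i ≤ e →
      i ≤ pickA_scan cs i fuel e ∧ pickA_scan cs i fuel e ≤ e ∧
      (∀ k, pickA_scan cs i fuel e < k → k ≤ e → ¬ pvIsMd cs k) ∧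
      (pvIsMd cs (pickA_scan cs i fuel e) ∨ pickA_scan cs i fuel e = i) := by
  intro fuel
  induction fuel with
  | zero =>
    intro e hn hie
    have : e = i := by omega
    subst this
    exact ⟨le_rfl, le_rfl, fun k hk1 hk2 => absurd (lt_of_lt_of_le hk1 hk2) (lt_irrefl _), Or.inr rfl⟩
  | succ m ih =>
    intro e hn hie
    rw [pickA_scan]
    by_cases h : i < e ∧ ¬ (PySem.List.pyGet? cs e = some 'm' ∨ PySem.List.pyGet? cs e = some 'd')
    · rw [if_pos h]
      obtain ⟨h1, h2, h3, h4⟩ := ih (e - 1) (by omega) (by omega)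
      refine ⟨h1, by omega, ?_, h4⟩
      intro k hk1 hk2
      rcases eq_or_lt_of_le hk2 with hk | hk
      · subst hk; exact h.2
      · exact h3 k hk1 (by omega)
    · rw [if_neg h]
      rcases not_and_or.mp h with h' | h'
      · have : e = i := by omega
        exact ⟨hie, le_rfl, fun k hk1 hk2 => absurd (lt_of_lt_of_le hk1 hk2) (lt_irrefl e), Or.inr this⟩
      · refine ⟨hie, le_rfl, fun k hk1 hk2 => absurd (lt_of_lt_of_le hk1 hk2) (lt_irrefl e), Or.inl ?_⟩
        show PySem.List.pyGet? cs e = some 'm' ∨ PySem.List.pyGet? cs e = some 'd'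
        exact not_not.mp h'

lemma pickB_noParen (cs : List Char) :
    ∀ (fuel : Nat) (j lastMd : Int), ((cs.length : Int) - j).toNat = fuel → 0 ≤ j →
      (∀ k, j ≤ k → k < (cs.length : Int) → PySem.List.pyGet? cs k ≠ some ')') →
      pickB_loop cs fuel lastMd j = "" := by
  intro fuel
  induction fuel with
  | zero => intro j lastMd hn hj0 hno; rfl
  | succ m ih =>
    intro j lastMd hn hj0 hno
    have hj : j < (cs.length : Int) := by omega
    have hlt : j.toNat < cs.length := by omega
    have hc : PySem.List.pyGet? cs j = some cs[j.toNat] := by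
      rw [PySem.List.pyGet?_of_nonneg cs hj0]
      exact List.getElem?_eq_getElem hlt
    rw [pickB_loop, if_pos hj, hc]
    show (if cs[j.toNat] = 'm' ∨ cs[j.toNat] = 'd' then pickB_loop cs m j (j + 1)
          else if cs[j.toNat] = ')' then
            (if lastMd = -1 then "" else String.ofList (PySem.List.slice cs (some lastMd) (some (j + 1))))
          else pickB_loop cs m lastMd (j + 1)) = ""
    by_cases hmd : cs[j.toNat] = 'm' ∨ cs[j.toNat] = 'd'
    · rw [if_pos hmd]
      exact ih (j + 1) j (by omega) (by omega) (fun k hk1 hk2 => hno k (by omega) hk2)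
    · rw [if_neg hmd]
      have hpar : ¬ cs[j.toNat] = ')' := by
        intro hcp
        exact hno j le_rfl hj (by rw [hc, hcp])
      rw [if_neg hpar]
      exact ih (j + 1) lastMd (by omega) (by omega) (fun k hk1 hk2 => hno k (by omega) hk2)

lemma pickB_toParen (cs : List Char) (e : Int) (he0 : 0 ≤ e)
    (hp : PySem.List.pyGet? cs e = some ')') :
    ∀ (fuel : Nat) (j lastMd : Int), ((cs.length : Int) - j).toNat = fuel → 0 ≤ j → j ≤ e →
      (∀ k, j ≤ k → k < e → PySem.List.pyGet? cs k ≠ some ')') →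
      pickB_loop cs fuel lastMd j =
        (if pvLastMd cs (e - j).toNat lastMd j e = -1 then ""
         else String.ofList (PySem.List.slice cs (some (pvLastMd cs (e - j).toNat lastMd j e)) (some (e + 1)))) := by
  have hlen : e < (cs.length : Int) := by
    rw [PySem.List.pyGet?_of_nonneg cs he0] at hp
    obtain ⟨hl, -⟩ := List.getElem?_eq_some_iff.mp hp
    omega
  intro fuel
  induction fuel with
  | zero => intro j lastMd hn hj0 hje hno; omega
  | succ m ih =>
    intro j lastMd hn hj0 hje hno
    have hj : j < (cs.length : Int) := by omega
    rcases eq_or_lt_of_le hje with hje' | hje'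
    · subst hje'
      rw [pickB_loop, if_pos hj, hp]
      show (if ')' = 'm' ∨ ')' = 'd' then pickB_loop cs m j (j + 1)
            else if ')' = ')' then
              (if lastMd = -1 then "" else String.ofList (PySem.List.slice cs (some lastMd) (some (j + 1))))
            else pickB_loop cs m lastMd (j + 1)) = _
      have hno' : ¬ (')' = 'm' ∨ ')' = 'd') := by decide
      rw [if_neg hno', if_pos rfl]
      rw [show (j - j).toNat = 0 from by omega]
      rfl
    · have hlt : j.toNat < cs.length := by omega
      have hc : PySem.List.pyGet? cs j = some cs[j.toNat] := by
        rw [PySem.List.pyGet?_of_nonneg cs hj0]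
        exact List.getElem?_eq_getElem hlt
      rw [pickB_loop, if_pos hj, hc]
      show (if cs[j.toNat] = 'm' ∨ cs[j.toNat] = 'd' then pickB_loop cs m j (j + 1)
            else if cs[j.toNat] = ')' then
              (if lastMd = -1 then "" else String.ofList (PySem.List.slice cs (some lastMd) (some (j + 1))))
            else pickB_loop cs m lastMd (j + 1)) = _
      have hpar : ¬ cs[j.toNat] = ')' := by
        intro hcp
        exact hno j le_rfl hje' (by rw [hc, hcp])
      have hfs : (e - j).toNat = (e - (j + 1)).toNat + 1 := by omega
      by_cases hmd : cs[j.toNat] = 'm' ∨ cs[j.toNat] = 'd'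
      · rw [if_pos hmd]
        have hmd' : PySem.List.pyGet? cs j = some 'm' ∨ PySem.List.pyGet? cs j = some 'd' := by
          rcases hmd with h | h
          · left; rw [hc, h]
          · right; rw [hc, h]
        rw [hfs, pvLastMd, if_pos hje', if_pos hmd']
        exact ih (j + 1) j (by omega) (by omega) (by omega) (fun k hk1 hk2 => hno k (by omega) hk2)
      · rw [if_neg hmd, if_neg hpar]
        have hmd' : ¬ (PySem.List.pyGet? cs j = some 'm' ∨ PySem.List.pyGet? cs j = some 'd') := by
          intro hor
          rcases hor with h | h <;> rw [hc] at h <;>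
            simp only [Option.some.injEq] at h <;> exact hmd (by tauto)
        rw [hfs, pvLastMd, if_pos hje', if_neg hmd']
        exact ih (j + 1) lastMd (by omega) (by omega) (by omega) (fun k hk1 hk2 => hno k (by omega) hk2)

-- pyGet? cs k = some ')' (0 ≤ k) gives the singleton-prefix facts the findFrom lemmas speak about
lemma paren_prefix_of_pyGet (cs : List Char) (k : Int) (hk : 0 ≤ k)
    (h : PySem.List.pyGet? cs k = some ')') : [')'] <+: cs.drop k.toNat := by
  rw [PySem.List.pyGet?_of_nonneg cs hk] at h
  refine ⟨(cs.drop k.toNat).tail, ?_⟩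
  have hdrop : (cs.drop k.toNat)[0]? = some ')' := by
    rw [List.getElem?_drop]
    simpa using h
  cases hd : cs.drop k.toNat with
  | nil => simp [hd] at hdrop
  | cons x xs =>
    rw [hd] at hdrop
    simp at hdrop
    simp [hdrop]

lemma pyGet_of_paren_prefix (cs : List Char) (k : Int) (hk : 0 ≤ k)
    (h : [')'] <+: cs.drop k.toNat) : PySem.List.pyGet? cs k = some ')' := by
  obtain ⟨t, ht⟩ := h
  rw [PySem.List.pyGet?_of_nonneg cs hk]
  have : (cs.drop k.toNat)[0]? = some ')' := by rw [← ht]; rfl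
  rw [List.getElem?_drop] at this
  simpa using this

lemma main_eq (text : String) (i : Int) (hi : 0 ≤ i) :
    pick_next_function text i = pick_next_function_alt text i := by
  unfold pick_next_function pick_next_function_alt
  simp only [PySem.Str.findFrom_eq]
  have htl : (")" : String).toList = [')'] := rfl
  rw [htl]
  set cs := text.toList with hcs
  by_cases hub : i ≤ (cs.length : Int)
  · have hkcast : ((i.toNat : Nat) : Int) = i := Int.toNat_of_nonneg hi
    have hkle : i.toNat ≤ cs.length := by omega
    by_cases hff : PySem.Chars.findFrom cs [')'] i = -1
    · rw [if_pos hff]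
      have hninf : ¬ [')'] <:+: cs.drop i.toNat :=
        (PySem.Chars.findFrom_natCast_eq_neg_one_iff cs [')'] i.toNat hkle).mp
          (by rw [hkcast]; exact hff)
      symm
      refine pickB_noParen cs ((cs.length : Int) - i).toNat i (-1) rfl hi ?_
      intro k hk1 hk2 hcp
      apply hninf
      have hpre := paren_prefix_of_pyGet cs k (by omega) hcp
      have hsuf : cs.drop k.toNat <:+ cs.drop i.toNat := by
        have h0 := List.drop_suffix (k.toNat - i.toNat) (cs.drop i.toNat)
        rwa [List.drop_drop, show i.toNat + (k.toNat - i.toNat) = k.toNat from by omega] at h0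
      exact hpre.isInfix.trans hsuf.isInfix
    · rw [if_neg hff]
      obtain ⟨hle, hpre, hmin⟩ := PySem.Chars.findFrom_natCast_spec cs [')'] i.toNat hkle
        (by rw [hkcast]; exact hff)
      rw [hkcast] at hle hpre hmin
      set e := PySem.Chars.findFrom cs [')'] i with he
      have he0 : 0 ≤ e := le_trans hi hle
      have hie : i ≤ e := hle
      have hpe : PySem.List.pyGet? cs e = some ')' := pyGet_of_paren_prefix cs e he0 hpre
      have hnoP : ∀ k, i ≤ k → k < e → PySem.List.pyGet? cs k ≠ some ')' := by
        intro k hk1 hk2 hcp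
        exact hmin k.toNat (by omega) (by omega) (paren_prefix_of_pyGet cs k (by omega) hcp)
      have hB := pickB_toParen cs e he0 hpe ((cs.length : Int) - i).toNat i (-1) rfl hi hie hnoP
      rw [hB]
      obtain ⟨hs1, hs2, hs3, hs4⟩ := pickA_scan_spec cs i (e - i).toNat e rfl hie
      set s := pickA_scan cs i (e - i).toNat e with hsdef
      have hnotMdE : ¬ pvIsMd cs e := by
        intro hmd
        rcases hmd with hmd | hmd <;> rw [hpe] at hmd <;> simp at hmd
      rcases pvLastMd_spec cs e (e - i).toNat i (-1) rfl hie with ⟨hm, hnoMd⟩ | ⟨hm1, hm2, hm3, hm4⟩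
      · -- no 'm'/'d' in [i, e): A's final test fails, B's last_md is still -1
        rw [hm, if_pos rfl]
        have hnotMdS : ¬ (PySem.List.pyGet? cs s = some 'm' ∨ PySem.List.pyGet? cs s = some 'd') := by
          intro hmd
          rcases eq_or_lt_of_le hs2 with hse | hse
          · exact hnotMdE (by rw [← hse]; exact hmd)
          · exact hnoMd s hs1 hse hmd
        rw [if_neg hnotMdS]
      · -- rightmost 'm'/'d' is m = pvLastMd …; A's backward scan stops exactly there
        set m := pvLastMd cs (e - i).toNat (-1) i e with hmdef
        have hmne : ¬ m = -1 := by omega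
        rw [if_neg hmne]
        have hsm : s = m := by
          by_contra hne
          rcases lt_or_gt_of_ne hne with hlt | hgt
          · -- m ∈ (s, e] contradicts A-scan's "no md above s"
            exact hs3 m hlt (le_of_lt hm2) hm3
          · -- s ∈ (m, e]: not md (by hm4 / not md at e), so s = i ≤ m < s
            have hnotMdS : ¬ pvIsMd cs s := by
              rcases eq_or_lt_of_le hs2 with hse | hse
              · rw [hse]; exact hnotMdE
              · exact hm4 s hgt hse
            rcases hs4 with hmd | hsi
            · exact hnotMdS hmd
            · omega
        have : (PySem.List.pyGet? cs s = some 'm' ∨ PySem.List.pyGet? cs s = some 'd') := by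
          rw [hsm]; exact hm3
        rw [if_pos this, hsm]
  · -- i past the end of the string: find returns -1 and B's fuel (len - i) is already 0
    have hff : PySem.Chars.findFrom cs [')'] i = -1 := by
      simp only [PySem.Chars.findFrom]
      rw [if_neg (show ¬ i < 0 by omega), if_pos (show ((cs.length : Nat) : Int) < i by omega)]
    rw [if_pos hff, show ((cs.length : Int) - i).toNat = 0 from by omega]
    rfl

-- ===== VERDICT (by name: the statement is the Claim_ definition above) =====
theorem pick_next_function_spec : Claim_equal_pick_next_function := by
  intro text i _ hpre
  show pick_next_function text i = pick_next_function_alt text i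
  exact main_eq text i hpre
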